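-- pv_equiv track=rewrite | github.com/vlad-bezden/data_structures_and_algorithms | data_structures_and_algorithms/fizz_buzz.py | fizz_buzz_iterables
-- ===== SOURCE A (Python) =====
-- from itertools import cycle, count
--
-- def fizz_buzz_iterables(n: int) -> str:
--     """Using itertools cycle function. Very slow."""
--     result = ""
--     fizz_buzz = (
--         (fizz + buzz) or str(i)
--         for i, fizz, buzz in zip(
--             count(1), cycle(["", "", "fizz"]), cycle(["", "", "", "", "buzz"])
--         )
--     )
--     for _ in range(n):
--         result = next(fizz_buzz)
--     return result
-- ===== SOURCE B (Python) =====
-- def fizz_buzz_iterables(n: int) -> str: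
--     """O(1) modulo arithmetic instead of iterating the whole sequence."""
--     if n <= 0:
--         return ""
--     if n % 15 == 0:
--         return "fizzbuzz"
--     if n % 3 == 0:
--         return "fizz"
--     if n % 5 == 0:
--         return "buzz"
--     return str(n)
-- ===== Notes on version B (the rewrite author's own statement) =====
-- stated objective: faster
-- what changed: B computes the nth value directly with modulo tests (n%15/n%3/n%5, empty string for n<=0) instead of iterating the itertools generator n times.
import Mathlib
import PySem

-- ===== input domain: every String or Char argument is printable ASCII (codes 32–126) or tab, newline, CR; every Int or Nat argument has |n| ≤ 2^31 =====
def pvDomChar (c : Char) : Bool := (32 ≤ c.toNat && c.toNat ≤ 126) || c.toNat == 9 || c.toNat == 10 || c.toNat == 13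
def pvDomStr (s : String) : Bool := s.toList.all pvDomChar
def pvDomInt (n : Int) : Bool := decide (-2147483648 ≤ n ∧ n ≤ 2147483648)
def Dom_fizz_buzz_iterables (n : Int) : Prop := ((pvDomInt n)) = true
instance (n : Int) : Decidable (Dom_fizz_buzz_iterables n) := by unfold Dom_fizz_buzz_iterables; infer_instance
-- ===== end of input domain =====

-- B replaces the O(n) generator iteration by an O(1) modulo computation of the nth FizzBuzz value.


-- ===== PORT A =====
-- one item of A's generator at 1-based position i: (fizz + buzz) or str(i);
-- cycle(["","","fizz"]) yields "fizz" exactly when i % 3 == 0, cycle of length 5 likewise for "buzz"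
def fbItem (i : Int) : String :=
  let s := (if PySem.Int.mod i 3 == 0 then "fizz" else "") ++
           (if PySem.Int.mod i 5 == 0 then "buzz" else "")
  if s == "" then PySem.Int.toStr i else s

-- for _ in range(n): result = next(fizz_buzz)  — the k-th iteration (k = 0..n-1) sets result to item k+1
def fizz_buzz_iterables (n : Int) : String :=
  (PySem.List.pyRange 0 n 1).foldl (fun _ k => fbItem (k + 1)) ""

-- ===== PORT B =====
def fizz_buzz_iterables_alt (n : Int) : String :=
  if n ≤ 0 then ""
  else if PySem.Int.mod n 15 == 0 then "fizzbuzz"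
  else if PySem.Int.mod n 3 == 0 then "fizz"
  else if PySem.Int.mod n 5 == 0 then "buzz"
  else PySem.Int.toStr n

-- ===== PRECONDITION & SPEC =====
def Spec_fizz_buzz_iterables (n : Int) (out : String) : Prop := out = fizz_buzz_iterables_alt n
instance (n : Int) (out : String) : Decidable (Spec_fizz_buzz_iterables n out) := by unfold Spec_fizz_buzz_iterables; infer_instance

-- ===== CLAIM (what is proved, stated in full; the proofs are below) =====
def Claim_equal_fizz_buzz_iterables : Prop := ∀ (n : Int), Dom_fizz_buzz_iterables n → Spec_fizz_buzz_iterables n (fizz_buzz_iterables n)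

-- ===== LEMMAS AND PROOFS =====

-- A's loop keeps only the last generator item: the fold over range(n) returns item n
lemma foldl_keep_last (f : Int → String) (n : Int) (hn : 0 < n) :
    (PySem.List.pyRange 0 n 1).foldl (fun _ k => f k) "" = f (n - 1) := by
  have h : PySem.List.pyRange 0 n 1 = PySem.List.pyRange 0 (n-1) 1 ++ [n-1] := by
    have h' := PySem.List.pyRange_one_succ_right (a := 0) (b := n - 1) (by omega)
    have hn1 : n - 1 + 1 = n := by omega
    rw [hn1] at h'
    exact h'
  rw [h, List.foldl_append]
  simp

-- for positive n, A's generator item equals B's direct modulo computation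
lemma fbItem_eq_alt (n : Int) (hn : 0 < n) : fbItem n = fizz_buzz_iterables_alt n := by
  have h15 := PySem.Int.mod_eq_zero_iff_dvd n 15
  have h3 := PySem.Int.mod_eq_zero_iff_dvd n 3
  have h5 := PySem.Int.mod_eq_zero_iff_dvd n 5
  have hn' : ¬ n ≤ 0 := by omega
  unfold fbItem fizz_buzz_iterables_alt
  rw [if_neg hn']
  by_cases d3 : (3:Int) ∣ n <;> by_cases d5 : (5:Int) ∣ n <;>
    [ (have b3 : (PySem.Int.mod n 3 == 0) = true := by simp; exact d3
       have b5 : (PySem.Int.mod n 5 == 0) = true := by simp; exact d5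
       have b15 : (PySem.Int.mod n 15 == 0) = true := by simp; omega
       simp only [b3, b5, b15, if_true]);
      (have b3 : (PySem.Int.mod n 3 == 0) = true := by simp; exact d3
       have b5 : (PySem.Int.mod n 5 == 0) = false := by simp; exact d5
       have b15 : (PySem.Int.mod n 15 == 0) = false := by simp; omega
       simp only [b3, b5, b15, if_true]);
      (have b3 : (PySem.Int.mod n 3 == 0) = false := by simp; exact d3
       have b5 : (PySem.Int.mod n 5 == 0) = true := by simp; exact d5
       have b15 : (PySem.Int.mod n 15 == 0) = false := by simp; omega
       simp only [b3, b5, b15, if_true]);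
      (have b3 : (PySem.Int.mod n 3 == 0) = false := by simp; exact d3
       have b5 : (PySem.Int.mod n 5 == 0) = false := by simp; exact d5
       have b15 : (PySem.Int.mod n 15 == 0) = false := by simp; omega
       simp only [b3, b5, b15]) ] <;>
  rfl

-- ===== VERDICT (by name: the statement is the Claim_ definition above) =====
theorem fizz_buzz_iterables_spec : Claim_equal_fizz_buzz_iterables := by
  intro n _
  unfold Spec_fizz_buzz_iterables fizz_buzz_iterables
  by_cases hn : n ≤ 0
  · rw [PySem.List.pyRange_one_eq_nil (by omega)]
    simp [fizz_buzz_iterables_alt, hn]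
  · have h := foldl_keep_last (fun k => fbItem (k + 1)) n (by omega)
    simp only [h]
    have hn1 : n - 1 + 1 = n := by omega
    rw [hn1]
    exact fbItem_eq_alt n (by omega)
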